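-- pv_equiv track=rewrite | github.com/MemberJunction/MJ | scripts/convert-baseline-v5-to-postgres.py | find_seed_section
-- ===== SOURCE A (Python) =====
-- def find_seed_section(lines):
--     """Find the line range for the seed data section."""
--     nocheck_start = None
--     for i, line in enumerate(lines):
--         stripped = line.strip()
--         if (stripped.startswith('ALTER TABLE') and 'NOCHECK CONSTRAINT' in stripped
--                 and 'WITH CHECK' not in stripped and not line.startswith('    ')):
--             nocheck_start = i
--             break
--
--     if nocheck_start is None:
--         for i, line in enumerate(lines):
--             if "PRINT(N'Add rows to" in line:
--                 nocheck_start = i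
--                 break
--
--     check_end = len(lines) - 1
--     for i in range(len(lines) - 1, -1, -1):
--         if 'WITH CHECK CHECK CONSTRAINT' in lines[i]:
--             check_end = i
--             break
--
--     return nocheck_start or 0, check_end
-- ===== SOURCE B (Python) =====
-- def find_seed_section(lines):
--     """Find the line range for the seed data section (single forward pass)."""
--     first_alter = first_print = last_check = None
--     for i, line in enumerate(lines):
--         stripped = line.strip()
--         if (first_alter is None and stripped.startswith('ALTER TABLE')
--                 and 'NOCHECK CONSTRAINT' in stripped
--                 and 'WITH CHECK' not in stripped and not line.startswith('    ')):
--             first_alter = i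
--         if first_print is None and "PRINT(N'Add rows to" in line:
--             first_print = i
--         if 'WITH CHECK CHECK CONSTRAINT' in line:
--             last_check = i
--     start = first_alter if first_alter is not None else first_print
--     end = last_check if last_check is not None else len(lines) - 1
--     return start or 0, end
-- ===== Notes on version B (the rewrite author's own statement) =====
-- stated objective: simpler
-- what changed: Replaces A's two forward scans (ALTER then PRINT) plus a separate reverse scan with a single forward pass maintaining first-ALTER, first-PRINT and last-WITH-CHECK accumulators, then combines them after the loop.
import Mathlib
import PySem

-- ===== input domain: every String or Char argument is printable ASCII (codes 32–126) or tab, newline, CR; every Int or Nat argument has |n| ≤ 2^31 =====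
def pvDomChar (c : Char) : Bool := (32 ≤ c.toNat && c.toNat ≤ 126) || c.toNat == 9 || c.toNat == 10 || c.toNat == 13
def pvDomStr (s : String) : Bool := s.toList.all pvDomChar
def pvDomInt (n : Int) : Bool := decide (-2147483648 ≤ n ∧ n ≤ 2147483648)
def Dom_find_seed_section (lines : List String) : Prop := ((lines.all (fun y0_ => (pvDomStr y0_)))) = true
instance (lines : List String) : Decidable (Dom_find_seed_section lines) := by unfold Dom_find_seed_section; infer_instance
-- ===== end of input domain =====

-- B replaces A's two forward scans plus a reverse scan by one forward pass keeping
-- first-ALTER / first-PRINT / last-WITH-CHECK accumulators (objective: simpler, same cost).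


-- predicates shared verbatim by both Python versions
def pvAlter (line : String) : Bool :=
  let stripped := PySem.Str.strip line
  PySem.Str.startswith stripped "ALTER TABLE" &&
    PySem.Str.isIn "NOCHECK CONSTRAINT" stripped &&
    !(PySem.Str.isIn "WITH CHECK" stripped) &&
    !(PySem.Str.startswith line "    ")

def pvPrint (line : String) : Bool := PySem.Str.isIn "PRINT(N'Add rows to" line

def pvCheck (line : String) : Bool := PySem.Str.isIn "WITH CHECK CHECK CONSTRAINT" line

-- ===== PORT A =====
-- first forward loop with break (over enumerate(lines))
def pvLoopA1 : List (Int × String) → Option Int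
  | [] => none
  | (i, line) :: rest => if pvAlter line then some i else pvLoopA1 rest

-- second forward loop with break
def pvLoopA2 : List (Int × String) → Option Int
  | [] => none
  | (i, line) :: rest => if pvPrint line then some i else pvLoopA2 rest

-- reverse loop: for i in range(len(lines)-1, -1, -1), break at first match, else default
def pvLoopA3 (lines : List String) : List Int → Int → Int
  | [], ce => ce
  | i :: rest, ce =>
      if pvCheck (PySem.List.pyGetD lines i "") then i else pvLoopA3 lines rest ce

def find_seed_section (lines : List String) : Int × Int :=
  let nocheck0 := pvLoopA1 (PySem.List.enumerate lines)
  let nocheck := match nocheck0 with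
    | some v => some v
    | none => pvLoopA2 (PySem.List.enumerate lines)
  let n := PySem.List.len lines
  let check_end := pvLoopA3 lines (PySem.List.pyRange (n - 1) (-1) (-1)) (n - 1)
  -- 'nocheck_start or 0': None → 0, 0 is falsy → 0, else the value
  (match nocheck with
    | none => 0
    | some v => if v == 0 then 0 else v, check_end)

-- ===== PORT B =====
-- one forward pass: first ALTER match, first PRINT match, last WITH-CHECK match
def pvStepB (acc : Option Int × Option Int × Option Int) (p : Int × String) :
    Option Int × Option Int × Option Int :=
  let fa := if acc.1.isNone && pvAlter p.2 then some p.1 else acc.1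
  let fp := if acc.2.1.isNone && pvPrint p.2 then some p.1 else acc.2.1
  let lc := if pvCheck p.2 then some p.1 else acc.2.2
  (fa, fp, lc)

def find_seed_section_alt (lines : List String) : Int × Int :=
  let st := (PySem.List.enumerate lines).foldl pvStepB (none, none, none)
  let start := match st.1 with
    | some v => some v
    | none => st.2.1
  let endv := st.2.2.getD (PySem.List.len lines - 1)
  (match start with
    | none => 0
    | some v => if v == 0 then 0 else v, endv)

-- ===== PRECONDITION & SPEC =====
def Spec_find_seed_section (lines : List String) (out : Int × Int) : Prop := out = find_seed_section_alt lines
instance (lines : List String) (out : Int × Int) : Decidable (Spec_find_seed_section lines out) := by unfold Spec_find_seed_section; infer_instance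

-- ===== CLAIM (what is proved, stated in full; the proofs are below) =====
def Claim_equal_find_seed_section : Prop := ∀ (lines : List String), Dom_find_seed_section lines → Spec_find_seed_section lines (find_seed_section lines)

-- ===== LEMMAS AND PROOFS =====

-- canonical "first index ≥ s whose line matches p"
def pvFirst (p : String → Bool) : List String → Int → Option Int
  | [], _ => none
  | x :: xs, s => if p x then some s else pvFirst p xs (s + 1)

-- canonical "last index ≥ s whose line matches p"
def pvLast (p : String → Bool) : List String → Int → Option Int
  | [], _ => none
  | x :: xs, s =>
      match pvLast p xs (s + 1) with
      | some i => some i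
      | none => if p x then some s else none

theorem pvLoopA1_eq (xs : List String) (s : Int) :
    pvLoopA1 (PySem.List.enumerate xs s) = pvFirst pvAlter xs s := by
  induction xs generalizing s with
  | nil => simp [PySem.List.enumerate_nil, pvLoopA1, pvFirst]
  | cons x xs ih => simp [PySem.List.enumerate_cons, pvLoopA1, pvFirst, ih]

theorem pvLoopA2_eq (xs : List String) (s : Int) :
    pvLoopA2 (PySem.List.enumerate xs s) = pvFirst pvPrint xs s := by
  induction xs generalizing s with
  | nil => simp [PySem.List.enumerate_nil, pvLoopA2, pvFirst]
  | cons x xs ih => simp [PySem.List.enumerate_cons, pvLoopA2, pvFirst, ih]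

theorem pvLast_append_singleton (p : String → Bool) (ys : List String) (y : String) (s : Int) :
    pvLast p (ys ++ [y]) s =
      if p y then some (s + ys.length) else pvLast p ys s := by
  induction ys generalizing s with
  | nil =>
      simp only [List.nil_append, pvLast, List.length_nil]
      by_cases h : p y <;> simp [h]
  | cons z zs ih =>
      simp only [List.cons_append, pvLast, ih]
      by_cases h : p y
      · simp [h]; omega
      · simp [h]

theorem pvLoopA3_eq (lines : List String) (k : Nat) (d : Int) (hk : k ≤ lines.length) :
    pvLoopA3 lines (PySem.List.pyRange ((k : Int) - 1) (-1) (-1)) d =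
      (pvLast pvCheck (lines.take k) 0).getD d := by
  induction k generalizing d with
  | zero =>
      rw [PySem.List.pyRange_neg_one_eq_nil (by norm_num)]
      simp [pvLoopA3, pvLast]
  | succ k ih =>
      have hlt : k < lines.length := hk
      rw [show (((k + 1 : Nat) : Int) - 1) = (k : Int) by push_cast; ring,
          PySem.List.pyRange_neg_one_cons (by omega)]
      have htake : lines.take (k + 1) = lines.take k ++ [lines[k]] := by
        rw [List.take_add_one]; simp [List.getElem?_eq_getElem hlt]
      have hget : PySem.List.pyGetD lines (k : Int) "" = lines[k] := by
        simp [PySem.List.pyGetD_natCast, List.getElem?_eq_getElem hlt]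
      simp only [pvLoopA3, hget, htake,
        pvLast_append_singleton pvCheck (lines.take k) lines[k] 0]
      have hlen : ((lines.take k).length : Int) = (k : Int) := by
        simp [List.length_take, Nat.min_eq_left (le_of_lt hlt)]
      by_cases h : pvCheck lines[k]
      · simp [h, Option.getD]
        omega
      · simp [h]
        rw [show ((k : Int) - 1) = ((k : Int) - 1) from rfl]
        exact ih d (le_of_lt hlt)

def pvOrO (a b : Option Int) : Option Int :=
  match a with
  | some v => some v
  | none => b

theorem pvFoldB_eq (xs : List String) (s : Int) (acc : Option Int × Option Int × Option Int) :
    (PySem.List.enumerate xs s).foldl pvStepB acc =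
      (pvOrO acc.1 (pvFirst pvAlter xs s),
       pvOrO acc.2.1 (pvFirst pvPrint xs s),
       pvOrO (pvLast pvCheck xs s) acc.2.2) := by
  induction xs generalizing s acc with
  | nil =>
      obtain ⟨fa, fp, lc⟩ := acc
      cases fa <;> cases fp <;>
        simp [PySem.List.enumerate_nil, pvFirst, pvLast, pvOrO]
  | cons x xs ih =>
      rw [PySem.List.enumerate_cons, List.foldl_cons, ih]
      obtain ⟨fa, fp, lc⟩ := acc
      simp only [pvStepB, pvFirst, pvLast, pvOrO, Prod.mk.injEq]
      refine ⟨?_, ?_, ?_⟩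
      · cases fa <;> by_cases h : pvAlter x <;> simp [h]
      · cases fp <;> by_cases h : pvPrint x <;> simp [h]
      · by_cases h : pvCheck x <;> cases hl : pvLast pvCheck xs (s + 1) <;> simp [h]

-- ===== VERDICT (by name: the statement is the Claim_ definition above) =====
theorem find_seed_section_spec : Claim_equal_find_seed_section := by
  intro lines _
  unfold Spec_find_seed_section find_seed_section find_seed_section_alt
  rw [pvFoldB_eq lines 0 (none, none, none)]
  simp only [pvOrO, pvLoopA1_eq, pvLoopA2_eq]
  have h3 := pvLoopA3_eq lines lines.length (PySem.List.len lines - 1) le_rfl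
  simp only [List.take_length] at h3
  simp only [PySem.List.len_eq] at *
  rw [h3]
  cases hl : pvLast pvCheck lines 0 <;>
    cases hf : pvFirst pvAlter lines 0 <;> simp [Option.getD]
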